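-- pv_equiv track=rewrite | github.com/ALS-H/Coding_Challenges | Q23.py | gen_ser
-- ===== SOURCE A (Python) =====
-- def gen_ser(N):
--     if N < 0:
--         raise ValueError("N can't be negative")
--     if N == 0:
--         return []
--
--     series = [1]
--     step = 4          # start: every 4th term has +8
--     counter = 1       # counts terms since last +8
--
--     while len(series) < N:
--         if counter == step:
--             series.append(series[-1] + 8)
--             counter = 1
--             if step > 1:
--                 step -= 1      # 4 → 3 → 2 → 1
--         else:
--             series.append(series[-1] + 4)
--             counter += 1
--
--     return series
-- ===== SOURCE B (Python) =====
-- def gen_ser(N):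
--     if N < 0:
--         raise ValueError("N can't be negative")
--     if N == 0:
--         return []
--     # build the increment sequence from its block structure:
--     # for s = 4,3,2,1 emit (s-1) fours then one 8; afterwards all increments are 8
--     inc = []
--     for s in (4, 3, 2, 1):
--         inc += [4] * (s - 1) + [8]
--     inc += [8] * max(0, (N - 1) - len(inc))
--     # prefix sums seeded at 1
--     series = [1]
--     for d in inc[:N - 1]:
--         series.append(series[-1] + d)
--     return series
-- ===== Notes on version B (the rewrite author's own statement) =====
-- stated objective: simpler
-- what changed: Replaces A's while loop with counter/step state machine by building the increment list from its block structure ((s-1) fours then an 8 for s=4,3,2,1, padded with 8's) and taking prefix sums seeded at 1.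
import Mathlib
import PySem

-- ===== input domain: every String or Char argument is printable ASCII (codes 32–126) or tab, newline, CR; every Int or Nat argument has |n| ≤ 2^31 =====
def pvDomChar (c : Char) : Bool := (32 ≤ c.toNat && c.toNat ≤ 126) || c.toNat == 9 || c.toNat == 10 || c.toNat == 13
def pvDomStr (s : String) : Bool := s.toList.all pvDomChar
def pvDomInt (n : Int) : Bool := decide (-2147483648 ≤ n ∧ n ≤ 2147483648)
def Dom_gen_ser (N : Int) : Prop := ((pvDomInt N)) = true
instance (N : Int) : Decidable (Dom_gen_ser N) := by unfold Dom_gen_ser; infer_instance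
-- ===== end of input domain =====

-- B rebuilds the series as prefix sums of an increment list built from its block
-- structure ((s-1) fours then an 8 for s = 4,3,2,1, then 8's), instead of A's
-- counter/step state machine (objective: simpler decomposition, same cost).

-- ===== PORT A =====
-- the while loop; fuel = N.toNat bounds the iteration count (each pass appends one
-- element starting from length 1), so the fuel guard never fires on admitted inputs
def gen_ser_loopA (fuel : Nat) (N : Int) (series : List Int) (step counter : Int) :
    List Int :=
  match fuel with
  | 0 => series
  | fuel + 1 =>
    if (series.length : Int) < N then
      -- series[-1]: the list is never empty here (it starts as [1]), so getD 0 is exact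
      let last := (PySem.List.pyGet? series (-1)).getD 0
      if counter == step then
        gen_ser_loopA fuel N (series ++ [last + 8])
          (if step > 1 then step - 1 else step) 1
      else
        gen_ser_loopA fuel N (series ++ [last + 4]) step (counter + 1)
    else series

def gen_ser (N : Int) : List Int :=
  if N < 0 then []        -- Python raises ValueError here; excluded by Pre_gen_ser
  else if N = 0 then []
  else gen_ser_loopA N.toNat N [1] 4 1

-- ===== PORT B =====
-- increments: for s in (4,3,2,1): (s-1) fours then an 8; then pad with 8's
def gen_ser_incs (N : Int) : List Int :=
  let inc := [4, 3, 2, 1].foldl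
    (fun (inc : List Int) (s : Int) => inc ++ List.replicate (s - 1).toNat 4 ++ [8]) []
  inc ++ List.replicate (max 0 ((N - 1) - inc.length)).toNat 8

def gen_ser_alt (N : Int) : List Int :=
  if N < 0 then []        -- Python raises ValueError here; excluded by Pre_gen_ser
  else if N = 0 then []
  else
    -- inc[:N-1] with N ≥ 1, so the slice is a take; prefix sums seeded at [1]
    ((gen_ser_incs N).take (N - 1).toNat).foldl
      (fun (series : List Int) (d : Int) =>
        series ++ [(PySem.List.pyGet? series (-1)).getD 0 + d]) [1]

-- ===== PRECONDITION & SPEC =====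
-- A raises ValueError on N < 0; Pre_ admits exactly the inputs where A returns
def Pre_gen_ser (N : Int) : Prop := 0 ≤ N
instance (N : Int) : Decidable (Pre_gen_ser N) := by unfold Pre_gen_ser; infer_instance
def pvWitness_gen_ser : Int := (7)

def Spec_gen_ser (N : Int) (out : List Int) : Prop := out = gen_ser_alt N
instance (N : Int) (out : List Int) : Decidable (Spec_gen_ser N out) := by
  unfold Spec_gen_ser; infer_instance

-- ===== CLAIM (what is proved, stated in full; the proofs are below) =====
def Claim_equal_gen_ser : Prop :=
  ∀ (N : Int), Dom_gen_ser N → Pre_gen_ser N → Spec_gen_ser N (gen_ser N)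

-- ===== LEMMAS AND PROOFS =====

-- the tail of both series: L+8, L+16, …, m terms
def pvTail8 (L : Int) : Nat → List Int
  | 0 => []
  | m + 1 => (L + 8) :: pvTail8 (L + 8) m

theorem pvLast_append (series : List Int) (x : Int) :
    (PySem.List.pyGet? (series ++ [x]) (-1)).getD 0 = x := by
  simp [PySem.List.pyGet?, PySem.List.pyIdx?]

-- A's loop in the saturated state step = counter = 1 appends L+8, L+16, …
theorem loopA_sat (fuel : Nat) :
    ∀ (N : Int) (series : List Int) (L : Int),
      (PySem.List.pyGet? series (-1)).getD 0 = L →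
      (N - series.length) ≤ fuel →
      gen_ser_loopA fuel N series 1 1 =
        series ++ pvTail8 L (N - series.length).toNat := by
  induction fuel with
  | zero =>
    intro N series L _ hf
    have h0 : (N - series.length).toNat = 0 := by omega
    simp [gen_ser_loopA, h0, pvTail8]
  | succ f ih =>
    intro N series L hL hf
    by_cases h : (series.length : Int) < N
    · have hrec := ih N (series ++ [L + 8]) (L + 8) (pvLast_append _ _) (by simp; omega)
      simp only [gen_ser_loopA, if_pos h, hL, beq_self_eq_true, if_true]
      rw [if_neg (show ¬((1 : Int) > 1) by norm_num), hrec]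
      have hm : (N - series.length).toNat = ((N - (series ++ [L + 8]).length).toNat) + 1 := by
        simp; omega
      rw [hm, pvTail8]
      simp
    · simp only [gen_ser_loopA, if_neg h]
      have h0 : (N - series.length).toNat = 0 := by omega
      simp [h0, pvTail8]

-- B's accumulation over a block of 8's appends L+8, L+16, …
theorem foldB_rep8 (m : Nat) :
    ∀ (series : List Int) (L : Int),
      (PySem.List.pyGet? series (-1)).getD 0 = L →
      (List.replicate m (8 : Int)).foldl
        (fun (series : List Int) (d : Int) =>
          series ++ [(PySem.List.pyGet? series (-1)).getD 0 + d]) series =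
        series ++ pvTail8 L m := by
  induction m with
  | zero => intro series L _; simp [pvTail8]
  | succ m ih =>
    intro series L hL
    rw [List.replicate_succ, List.foldl_cons, hL,
      ih (series ++ [L + 8]) (L + 8) (pvLast_append _ _), pvTail8]
    simp

-- both programs, for N ≥ 11, are the fixed 11-element prefix followed by the 8-tail
def pvPrefix11 : List Int := [1, 5, 9, 13, 21, 25, 29, 37, 41, 49, 57]

theorem gen_ser_big (N : Int) (h : 11 ≤ N) :
    gen_ser N = pvPrefix11 ++ pvTail8 57 (N - 11).toNat := by
  have h0 : ¬ N < 0 := by omega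
  have h1 : ¬ N = 0 := by omega
  rw [gen_ser, if_neg h0, if_neg h1]
  -- peel the first 10 iterations of the loop
  obtain ⟨k, hk⟩ : ∃ k : Nat, N.toNat = k + 11 := ⟨N.toNat - 11, by omega⟩
  have hNk : (N : Int) = (k : Int) + 11 := by omega
  rw [hk]
  have step : ∀ (f : Nat) (series : List Int) (st c : Int),
      (series.length : Int) < N →
      gen_ser_loopA (f + 1) N series st c =
        (if c == st then
          gen_ser_loopA f N (series ++ [(PySem.List.pyGet? series (-1)).getD 0 + 8])
            (if st > 1 then st - 1 else st) 1
        else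
          gen_ser_loopA f N (series ++ [(PySem.List.pyGet? series (-1)).getD 0 + 4])
            st (c + 1)) := by
    intro f series st c hlt
    simp only [gen_ser_loopA, if_pos hlt]
  have hlt : ∀ (L : List Int), L.length ≤ 10 → ((L.length : Int) < N) := by
    intro L hL; omega
  rw [show k + 11 = k + 1 + 10 by ring]
  rw [step _ [1] 4 1 (hlt _ (by decide))]
  norm_num [PySem.List.pyGet?, PySem.List.pyIdx?]
  rw [show k + 1 + 9 = k + 1 + 8 + 1 by ring, step _ _ 4 2 (hlt _ (by decide))]
  norm_num [PySem.List.pyGet?, PySem.List.pyIdx?]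
  rw [show k + 1 + 8 = k + 1 + 7 + 1 by ring, step _ _ 4 3 (hlt _ (by decide))]
  norm_num [PySem.List.pyGet?, PySem.List.pyIdx?]
  rw [show k + 1 + 7 = k + 1 + 6 + 1 by ring, step _ _ 4 4 (hlt _ (by decide))]
  norm_num [PySem.List.pyGet?, PySem.List.pyIdx?]
  rw [show k + 1 + 6 = k + 1 + 5 + 1 by ring, step _ _ 3 1 (hlt _ (by decide))]
  norm_num [PySem.List.pyGet?, PySem.List.pyIdx?]
  rw [show k + 1 + 5 = k + 1 + 4 + 1 by ring, step _ _ 3 2 (hlt _ (by decide))]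
  norm_num [PySem.List.pyGet?, PySem.List.pyIdx?]
  rw [show k + 1 + 4 = k + 1 + 3 + 1 by ring, step _ _ 3 3 (hlt _ (by decide))]
  norm_num [PySem.List.pyGet?, PySem.List.pyIdx?]
  rw [show k + 1 + 3 = k + 1 + 2 + 1 by ring, step _ _ 2 1 (hlt _ (by decide))]
  norm_num [PySem.List.pyGet?, PySem.List.pyIdx?]
  rw [show k + 1 + 2 = k + 1 + 1 + 1 by ring, step _ _ 2 2 (hlt _ (by decide))]
  norm_num [PySem.List.pyGet?, PySem.List.pyIdx?]
  rw [show k + 1 + 1 = k + 1 + 0 + 1 by ring, step _ _ 1 1 (hlt _ (by decide))]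
  norm_num [PySem.List.pyGet?, PySem.List.pyIdx?]
  rw [loopA_sat (k + 1) N [1, 5, 9, 13, 21, 25, 29, 37, 41, 49, 57] 57 (by decide)
    (by simp; omega)]
  norm_num [pvPrefix11]

theorem gen_ser_alt_big (N : Int) (h : 11 ≤ N) :
    gen_ser_alt N = pvPrefix11 ++ pvTail8 57 (N - 11).toNat := by
  have h0 : ¬ N < 0 := by omega
  have h1 : ¬ N = 0 := by omega
  rw [gen_ser_alt, if_neg h0, if_neg h1]
  have hbase : gen_ser_incs N =
      [4, 4, 4, 8, 4, 4, 8, 4, 8, 8] ++ List.replicate (N - 11).toNat 8 := by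
    unfold gen_ser_incs
    rw [show ([4, 3, 2, 1] : List Int).foldl
        (fun (inc : List Int) (s : Int) =>
          inc ++ List.replicate (s - 1).toNat 4 ++ [8]) [] =
        ([4, 4, 4, 8, 4, 4, 8, 4, 8, 8] : List Int) from by decide]
    have hc : (max 0 ((N - 1) -
        (([4, 4, 4, 8, 4, 4, 8, 4, 8, 8] : List Int).length : Int))).toNat =
        (N - 11).toNat := by
      simp
      omega
    show ([4, 4, 4, 8, 4, 4, 8, 4, 8, 8] : List Int) ++
        List.replicate (max 0 ((N - 1) -
          (([4, 4, 4, 8, 4, 4, 8, 4, 8, 8] : List Int).length : Int))).toNat 8 = _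
    rw [hc]
  have hlen : ((gen_ser_incs N).take (N - 1).toNat) =
      [4, 4, 4, 8, 4, 4, 8, 4, 8, 8] ++ List.replicate (N - 11).toNat 8 := by
    rw [hbase]
    apply List.take_of_length_le
    simp
    omega
  rw [hlen, List.foldl_append]
  have hpre : ([4, 4, 4, 8, 4, 4, 8, 4, 8, 8] : List Int).foldl
      (fun (series : List Int) (d : Int) =>
        series ++ [(PySem.List.pyGet? series (-1)).getD 0 + d]) [1] = pvPrefix11 := by
    decide
  rw [hpre]
  exact foldB_rep8 (N - 11).toNat pvPrefix11 57 (by decide)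

-- ===== VERDICT (by name: the statement is the Claim_ definition above) =====
theorem gen_ser_spec : Claim_equal_gen_ser := by
  intro N _ hpre
  unfold Spec_gen_ser
  by_cases hbig : 11 ≤ N
  · rw [gen_ser_big N hbig, gen_ser_alt_big N hbig]
  · have h0 : (0 : Int) ≤ N := hpre
    interval_cases N <;> decide
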